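-- pv_equiv track=rewrite | github.com/georgerapeanu/BBU-Computer-Science | FP/homeworks/a2-georgerapeanu/src/program.py | get_sequence_3
-- ===== SOURCE A (Python) =====
-- def get_real(z):
--   """this function returns the real part of a complex number
--
--   given a complex number, this function returns the real part of a complex number
--
--   z: complex number
--
--   returns: real part(int)
--   """
--
--   return z[0]
--
-- def get_imag(z):
--   """this function returns the imaginary part of a complex number
--
--   given a complex number, this function returns the imaginary part of a complex number
--
--   z: complex number
--
--   returns: imaginary part(int)
--   """
--
--   return z[1]
--
-- def get_modulus_squared(z):
--   """this function returns the modulus raised to the power of 2 of a complex number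
--
--   given a complex number, this function returns the modulus of that number raised to the power of 2
--
--   z: complex number
--
--   returns: modulus squared(int)
--   """
--
--   return get_real(z) ** 2 + get_imag(z) ** 2
--
-- def get_sequence_3(numbers):
--   """this function returns the longest sequence of numbers that respect propriety 3
--     given a list of complex numbers, returns the longest sequence of numbers that respect propriety 3
--
--     numbers: list of complex numbers
--     returns: list of complex numbers
--   """
--
--   fr = {}
--
--   for z in numbers:
--     modulus_squared = get_modulus_squared(z) #using modulus squared in order to avoid floating point errors
--     if modulus_squared not in fr:
--       fr[modulus_squared] = 0
--     fr[get_modulus_squared(z)] += 1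
--
--   best_modulus_squared, best_length = 0,-1
--   answer = []
--
--   for x in fr:
--     if fr[x] > best_length:
--       best_length = fr[x]
--       best_modulus_squared = x
--
--   for z in numbers:
--     if get_modulus_squared(z) == best_modulus_squared:
--       answer.append(z)
--
--   return answer
-- ===== SOURCE B (Python) =====
-- def get_sequence_3(numbers):
--   """Group numbers by modulus squared in one dict of buckets, then return
--   the longest bucket (first one on ties, matching insertion order)."""
--   groups = {}
--   for z in numbers:
--     m = z[0] ** 2 + z[1] ** 2
--     groups[m] = groups.get(m, []) + [z]
--   best = []
--   for g in groups.values():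
--     if len(g) > len(best):
--       best = g
--   return best
-- ===== Notes on version B (the rewrite author's own statement) =====
-- stated objective: simpler
-- what changed: B groups the numbers into per-modulus buckets in one dict pass and returns the first longest bucket, replacing A's count dict plus argmax key scan plus a second full rescan of the input.
import Mathlib
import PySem

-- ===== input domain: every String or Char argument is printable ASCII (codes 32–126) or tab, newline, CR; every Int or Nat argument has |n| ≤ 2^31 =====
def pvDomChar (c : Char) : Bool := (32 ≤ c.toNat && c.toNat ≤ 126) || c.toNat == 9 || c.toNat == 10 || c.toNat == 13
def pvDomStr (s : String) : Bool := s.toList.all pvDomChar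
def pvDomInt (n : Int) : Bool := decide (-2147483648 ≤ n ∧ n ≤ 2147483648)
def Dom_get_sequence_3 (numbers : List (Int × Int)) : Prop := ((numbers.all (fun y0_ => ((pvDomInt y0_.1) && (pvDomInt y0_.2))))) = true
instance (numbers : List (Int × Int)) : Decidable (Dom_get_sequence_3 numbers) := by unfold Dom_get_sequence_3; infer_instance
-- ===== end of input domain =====

-- B replaces A's count-dict + argmax-key scan + second rescan of the input with one
-- grouping pass into per-modulus buckets and picking the first longest bucket (objective: simpler).


-- ===== PORT A =====
def get_real (z : Int × Int) : Int := z.1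

def get_imag (z : Int × Int) : Int := z.2

def get_modulus_squared (z : Int × Int) : Int := get_real z ^ 2 + get_imag z ^ 2

def get_sequence_3 (numbers : List (Int × Int)) : List (Int × Int) :=
  -- fr = {}; for z in numbers: ms = …; if ms not in fr: fr[ms] = 0; fr[get_modulus_squared(z)] += 1
  let fr : PySem.Dict Int Int :=
    numbers.foldl (fun fr z =>
      let modulus_squared := get_modulus_squared z
      let fr := if fr.contains modulus_squared then fr else fr.insert modulus_squared 0
      fr.modify (get_modulus_squared z) 0 (· + 1)) PySem.Dict.empty
  -- best_modulus_squared, best_length = 0, -1; for x in fr: if fr[x] > best_length: …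
  let best : Int × Int :=
    fr.keys.foldl (fun (b : Int × Int) x =>
      if fr.getD x 0 > b.2 then (x, fr.getD x 0) else b) (0, -1)
  -- answer = []; for z in numbers: if get_modulus_squared(z) == best_modulus_squared: answer.append(z)
  numbers.foldl (fun answer z =>
    if get_modulus_squared z == best.1 then answer ++ [z] else answer) []

-- ===== PORT B =====
def get_sequence_3_alt (numbers : List (Int × Int)) : List (Int × Int) :=
  -- groups = {}; for z in numbers: m = z[0]**2 + z[1]**2; groups[m] = groups.get(m, []) + [z]
  let groups : PySem.Dict Int (List (Int × Int)) :=
    numbers.foldl (fun groups z =>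
      groups.modify (z.1 ^ 2 + z.2 ^ 2) [] (· ++ [z])) PySem.Dict.empty
  -- best = []; for g in groups.values(): if len(g) > len(best): best = g
  groups.values.foldl (fun best g => if g.length > best.length then g else best) []

-- ===== PRECONDITION & SPEC =====
def Spec_get_sequence_3 (numbers : List (Int × Int)) (out : List (Int × Int)) : Prop := out = get_sequence_3_alt numbers
instance (numbers : List (Int × Int)) (out : List (Int × Int)) : Decidable (Spec_get_sequence_3 numbers out) := by unfold Spec_get_sequence_3; infer_instance

-- ===== CLAIM (what is proved, stated in full; the proofs are below) =====
def Claim_equal_get_sequence_3 : Prop := ∀ (numbers : List (Int × Int)), Dom_get_sequence_3 numbers → Spec_get_sequence_3 numbers (get_sequence_3 numbers)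

-- ===== LEMMAS AND PROOFS =====

-- modulus squared, as both ports compute it
def pvMsq (z : Int × Int) : Int := z.1 ^ 2 + z.2 ^ 2

-- the bucket of key k (what both programs ultimately return for the winning key)
def pvFlt (numbers : List (Int × Int)) (k : Int) : List (Int × Int) :=
  numbers.filter (fun z => pvMsq z == k)

-- A's loop body / B's loop body, named (definitionally equal to the lambdas in the ports)
def pvStepA (fr : PySem.Dict Int Int) (z : Int × Int) : PySem.Dict Int Int :=
  let modulus_squared := get_modulus_squared z
  let fr := if fr.contains modulus_squared then fr else fr.insert modulus_squared 0
  fr.modify (get_modulus_squared z) 0 (· + 1)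

def pvStepB (groups : PySem.Dict Int (List (Int × Int))) (z : Int × Int) :
    PySem.Dict Int (List (Int × Int)) :=
  groups.modify (z.1 ^ 2 + z.2 ^ 2) [] (· ++ [z])

theorem pvFlt_length (numbers : List (Int × Int)) (k : Int) :
    (pvFlt numbers k).length = (numbers.map pvMsq).count k := by
  rw [pvFlt, List.count, List.countP_map, ← List.countP_eq_length_filter]
  rfl

theorem pvStepA_getD (d : PySem.Dict Int Int) (z : Int × Int) (x : Int) :
    (pvStepA d z).getD x 0 = if x = pvMsq z then d.getD x 0 + 1 else d.getD x 0 := by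
  have hstep : pvStepA d z
      = (if d.contains (pvMsq z) = true then d else d.insert (pvMsq z) 0).modify
          (pvMsq z) 0 (· + 1) := rfl
  rw [hstep]
  by_cases hc : d.contains (pvMsq z) = true
  · rw [if_pos hc]
    rcases eq_or_ne x (pvMsq z) with h | h
    · subst h; rw [PySem.Dict.getD_modify_self, if_pos rfl]
    · rw [PySem.Dict.getD_modify_of_ne d 0 _ h, if_neg h]
  · rw [Bool.not_eq_true] at hc
    simp only [hc, Bool.false_eq_true, if_false]
    rcases eq_or_ne x (pvMsq z) with h | h
    · subst h
      rw [PySem.Dict.getD_modify_self, PySem.Dict.getD_insert_self, if_pos rfl,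
        PySem.Dict.getD_of_not_contains d 0 hc]
    · rw [PySem.Dict.getD_modify_of_ne _ 0 _ h, PySem.Dict.getD_insert_of_ne _ 0 0 h, if_neg h]

theorem pvStepA_keys (d : PySem.Dict Int Int) (z : Int × Int) :
    (pvStepA d z).keys = PySem.Set.add d.keys (pvMsq z) := by
  have hstep : pvStepA d z
      = (if d.contains (pvMsq z) = true then d else d.insert (pvMsq z) 0).modify
          (pvMsq z) 0 (· + 1) := rfl
  rw [hstep]
  by_cases hc : d.contains (pvMsq z) = true
  · rw [if_pos hc, PySem.Dict.keys_modify, PySem.Dict.keys_insert_of_contains _ _ hc]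
    have hm : pvMsq z ∈ d.keys := (PySem.Dict.contains_iff_mem_keys d (pvMsq z)).mp hc
    simp [PySem.Set.add, List.contains_eq_mem, hm]
  · rw [Bool.not_eq_true] at hc
    simp only [hc, Bool.false_eq_true, if_false]
    rw [PySem.Dict.keys_modify,
      PySem.Dict.keys_insert_of_contains _ _ (PySem.Dict.contains_insert_self d _ 0),
      PySem.Dict.keys_insert_of_not_contains _ _ hc]
    have hm : pvMsq z ∉ d.keys := fun hmem =>
      by simp [(PySem.Dict.contains_iff_mem_keys d (pvMsq z)).mpr hmem] at hc
    simp [PySem.Set.add, List.contains_eq_mem, hm]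

theorem pvFrA_getD (l : List (Int × Int)) (d : PySem.Dict Int Int) (x : Int) :
    (l.foldl pvStepA d).getD x 0 = d.getD x 0 + ((l.map pvMsq).count x : Int) := by
  induction l generalizing d with
  | nil => simp
  | cons z l ih =>
    rw [List.foldl_cons, ih, pvStepA_getD, List.map_cons, List.count_cons]
    rcases eq_or_ne x (pvMsq z) with h | h
    · simp [h]; ring
    · simp [h, Ne.symm h]

theorem pvFrA_keys (l : List (Int × Int)) (d : PySem.Dict Int Int) :
    (l.foldl pvStepA d).keys = PySem.Set.update d.keys (l.map pvMsq) := by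
  induction l generalizing d with
  | nil => simp [PySem.Set.update]
  | cons z l ih =>
    rw [List.foldl_cons, ih, pvStepA_keys, List.map_cons]
    simp [PySem.Set.update]

theorem pvSetUpdate_nil (xs : List Int) :
    PySem.Set.update ([] : PySem.Set Int) xs = PySem.Set.ofList xs := by
  have h := PySem.Dict.keys_counter xs
  rw [PySem.Dict.counter_eq_foldl,
    PySem.Dict.keys_foldl_modify xs (0 : Int) (fun _ _ => (· + 1)) PySem.Dict.empty] at h
  simpa using h.symm

theorem pvGroups_getD (numbers : List (Int × Int)) (c : Int) :
    (numbers.foldl pvStepB PySem.Dict.empty).getD c [] = pvFlt numbers c := by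
  have h1 : numbers.foldl pvStepB PySem.Dict.empty
      = ((numbers.map (fun z => (pvMsq z, z))).foldl
          (fun d p => d.modify p.1 [] (· ++ [p.2])) PySem.Dict.empty) := by
    rw [List.foldl_map]
    rfl
  rw [h1, PySem.Dict.getD_foldl_modify_append, List.filter_map, List.map_map]
  show List.map (fun z => z) (numbers.filter (fun z => pvMsq z == c)) = pvFlt numbers c
  simp [pvFlt]

theorem pvGroups_keys (numbers : List (Int × Int)) :
    (numbers.foldl pvStepB PySem.Dict.empty).keys
      = PySem.Set.ofList (numbers.map pvMsq) := by
  have h := PySem.Dict.keys_foldl_modify_key numbers (fun z => z.1 ^ 2 + z.2 ^ 2)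
    ([] : List (Int × Int)) (fun _ z => (· ++ [z])) PySem.Dict.empty
  have h2 : (numbers.map (fun z : Int × Int => z.1 ^ 2 + z.2 ^ 2)) = numbers.map pvMsq := rfl
  rw [h2] at h
  rw [show (numbers.foldl pvStepB PySem.Dict.empty) =
      (List.foldl (fun d z => d.modify ((fun z : Int × Int => z.1 ^ 2 + z.2 ^ 2) z) []
        ((fun _ z => (· ++ [z])) d z)) PySem.Dict.empty numbers) from rfl, h]
  simpa using pvSetUpdate_nil (numbers.map pvMsq)

theorem pvGroups_nodup (numbers : List (Int × Int)) :
    (numbers.foldl pvStepB PySem.Dict.empty).keys.Nodup := by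
  have h := PySem.Dict.nodup_keys_foldl_modify_key numbers (fun z => z.1 ^ 2 + z.2 ^ 2)
    ([] : List (Int × Int)) (fun _ z => (· ++ [z])) PySem.Dict.empty (by simp)
  exact h

-- the update of a set only appends new elements
theorem pvSetUpdate_ext (xs : List Int) (s : PySem.Set Int) :
    ∃ t, PySem.Set.update s xs = s ++ t := by
  induction xs generalizing s with
  | nil => exact ⟨[], by simp [PySem.Set.update]⟩
  | cons x xs ih =>
    rcases ih (s.add x) with ⟨t, ht⟩
    have hcons : PySem.Set.update s (x :: xs) = PySem.Set.update (s.add x) xs := rfl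
    by_cases hc : s.contains x = true
    · have hadd : s.add x = s := by simp only [PySem.Set.add, if_pos hc]
      exact ⟨t, by rw [hcons, ht, hadd]⟩
    · have hadd : s.add x = s ++ [x] := by simp only [PySem.Set.add, if_neg hc]
      exact ⟨x :: t, by rw [hcons, ht, hadd]; simp⟩

-- the paired selection loops: A picks the first key of maximal count, B the first bucket
-- of maximal length; from matched states they stay matched
theorem pvSel (numbers : List (Int × Int)) (ks : List Int)
    (hk : ∀ k ∈ ks, 1 ≤ (numbers.map pvMsq).count k)
    (b : Int × Int) (best : List (Int × Int))
    (h1 : best = pvFlt numbers b.1)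
    (h2 : b.2 = ((numbers.map pvMsq).count b.1 : Int)) :
    (ks.foldl (fun best k =>
        if (pvFlt numbers k).length > best.length then pvFlt numbers k else best) best)
      = pvFlt numbers (ks.foldl (fun (b : Int × Int) x =>
          if ((numbers.map pvMsq).count x : Int) > b.2 then (x, ((numbers.map pvMsq).count x : Int)) else b) b).1
    ∧ (ks.foldl (fun (b : Int × Int) x =>
          if ((numbers.map pvMsq).count x : Int) > b.2 then (x, ((numbers.map pvMsq).count x : Int)) else b) b).2
      = ((numbers.map pvMsq).count (ks.foldl (fun (b : Int × Int) x =>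
          if ((numbers.map pvMsq).count x : Int) > b.2 then (x, ((numbers.map pvMsq).count x : Int)) else b) b).1 : Int) := by
  induction ks generalizing b best with
  | nil => exact ⟨h1, h2⟩
  | cons k ks ih =>
    rw [List.foldl_cons, List.foldl_cons]
    have hcond : ((numbers.map pvMsq).count k : Int) > b.2
        ↔ (pvFlt numbers k).length > best.length := by
      rw [h1, h2, pvFlt_length, pvFlt_length]
      constructor <;> intro h <;> [exact_mod_cast h; exact_mod_cast h]
    by_cases hgt : ((numbers.map pvMsq).count k : Int) > b.2
    · rw [if_pos hgt, if_pos (hcond.mp hgt)]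
      exact ih (fun j hj => hk j (List.mem_cons_of_mem _ hj)) (k, _) _ rfl rfl
    · rw [if_neg hgt, if_neg (fun hh => hgt (hcond.mpr hh))]
      exact ih (fun j hj => hk j (List.mem_cons_of_mem _ hj)) b best h1 h2

-- a filter-accumulating loop is a filter
theorem pvFoldAppendIf (p : (Int × Int) → Bool) (l : List (Int × Int)) (acc : List (Int × Int)) :
    l.foldl (fun acc z => if p z then acc ++ [z] else acc) acc = acc ++ l.filter p := by
  have h := PySem.List.foldl_append_if p (id : (Int × Int) → (Int × Int)) l acc
  simpa using h

-- ===== VERDICT (by name: the statement is the Claim_ definition above) =====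
theorem get_sequence_3_spec : Claim_equal_get_sequence_3 := by
  intro numbers _
  unfold Spec_get_sequence_3
  have hfr : ∀ x, (numbers.foldl pvStepA PySem.Dict.empty).getD x 0
      = (((numbers.map pvMsq).count x : Int)) := fun x => by
    rw [pvFrA_getD]; simp
  have hfrK : (numbers.foldl pvStepA PySem.Dict.empty).keys
      = PySem.Set.ofList (numbers.map pvMsq) := by
    rw [pvFrA_keys, PySem.Dict.keys_empty, pvSetUpdate_nil]
  show (numbers.foldl (fun answer z =>
      if pvMsq z == (((numbers.foldl pvStepA PySem.Dict.empty).keys).foldl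
          (fun (b : Int × Int) x => if (numbers.foldl pvStepA PySem.Dict.empty).getD x 0 > b.2
            then (x, (numbers.foldl pvStepA PySem.Dict.empty).getD x 0) else b) (0, -1)).1
      then answer ++ [z] else answer) [])
    = ((numbers.foldl pvStepB PySem.Dict.empty).values.foldl
        (fun best g => if g.length > best.length then g else best) [])
  rw [hfrK]
  simp only [hfr]
  rw [PySem.Dict.values_eq_map_keys _ (pvGroups_nodup numbers) ([] : List (Int × Int)),
    pvGroups_keys]
  simp only [pvGroups_getD]
  rw [List.foldl_map, pvFoldAppendIf, List.nil_append]
  cases numbers with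
  | nil => rfl
  | cons z0 rest =>
    obtain ⟨t, ht⟩ := pvSetUpdate_ext (rest.map pvMsq) ([pvMsq z0])
    have hK : PySem.Set.ofList ((z0 :: rest).map pvMsq) = pvMsq z0 :: t := by
      rw [← pvSetUpdate_nil]
      have h1 : PySem.Set.update ([] : PySem.Set Int) ((z0 :: rest).map pvMsq)
          = PySem.Set.update (PySem.Set.add [] (pvMsq z0)) (rest.map pvMsq) := rfl
      have h2 : PySem.Set.add ([] : PySem.Set Int) (pvMsq z0) = [pvMsq z0] := by
        simp [PySem.Set.add]
      rw [h1, h2, ht]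
      rfl
    rw [hK, List.foldl_cons, List.foldl_cons]
    rw [if_pos (by omega : ((((z0 :: rest).map pvMsq).count (pvMsq z0) : Int)) > (-1 : Int))]
    rw [if_pos (by rw [pvFlt_length]; simp)]
    have hk : ∀ k ∈ t, 1 ≤ ((z0 :: rest).map pvMsq).count k := by
      intro k hkt
      apply List.count_pos_iff.mpr
      have : k ∈ PySem.Set.ofList ((z0 :: rest).map pvMsq) := by
        rw [hK]; exact List.mem_cons_of_mem _ hkt
      exact (PySem.Set.mem_ofList _ _).mp this
    exact ((pvSel (z0 :: rest) t hk (pvMsq z0, (((z0 :: rest).map pvMsq).count (pvMsq z0) : Int))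
      (pvFlt (z0 :: rest) (pvMsq z0)) rfl rfl).1).symm
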